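-- pv_equiv track=rewrite | github.com/dvargas2013/MainPythons | done/String/Solver/__init__.py | createWordsViaDeletion
-- ===== SOURCE A (Python) =====
-- from collections import Counter
--
-- masterDictionary = set()
--
-- def createWordsViaDeletion(big_word, dictionary=None):
--     if dictionary is None:
--         dictionary = sorted(map(str.lower, masterDictionary), reverse=True, key=len)
--
--     big_word = "".join(i for i in big_word.lower() if i.isalpha())
--     big_word_set = set(big_word)
--     big_word_counter = Counter(big_word)
--
--     def checkword():
--         if not big_word_set.issuperset(word): return False
--         c = Counter(word)
--         if any(c[k] > i for k, i in big_word_counter.items()): return False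
--         i = 0
--         for L in word:
--             i = big_word.find(L, i)
--             if i == -1: return False
--         return True
--
--     for word in dictionary:
--         if checkword(): yield word
-- ===== SOURCE B (Python) =====
-- masterDictionary = set()
--
-- def createWordsViaDeletion(big_word, dictionary=None):
--     if dictionary is None:
--         dictionary = sorted(map(str.lower, masterDictionary), reverse=True, key=len)
--
--     big = [c for c in big_word.lower() if c.isalpha()]
--     n = len(big)
--     # next-occurrence jump table: nxt[i] maps c to the least j >= i with big[j] == c
--     nxt = [dict() for _ in range(n + 1)]
--     for i in range(n - 1, -1, -1):
--         nxt[i] = dict(nxt[i + 1])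
--         nxt[i][big[i]] = i
--
--     for word in dictionary:
--         i = 0
--         for ch in word:
--             j = nxt[i].get(ch)
--             if j is None:
--                 break
--             i = j + 1
--         else:
--             yield word
-- ===== Notes on version B (the rewrite author's own statement) =====
-- stated objective: alternative
-- what changed: B precomputes a next-occurrence jump table over the cleaned big_word once and tests each dictionary word as a true subsequence in one pass of table hops, replacing A's per-word set-superset test, Counter scan and str.find index walk.
-- intended difference: On dictionaries containing a word whose letters form a sub-multiset of the cleaned big_word and whose run-collapsed form is a subsequence of it while the word itself is not (e.g. big_word 'aba', word 'aab'), A yields the word because its find loop restarts at the matched index instead of after it, while B omits it; only words truly obtainable by deleting letters are intended. — e.g. on createWordsViaDeletion("aba", some ["aab"]): A returns ["aab"], B returns []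
import Mathlib
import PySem

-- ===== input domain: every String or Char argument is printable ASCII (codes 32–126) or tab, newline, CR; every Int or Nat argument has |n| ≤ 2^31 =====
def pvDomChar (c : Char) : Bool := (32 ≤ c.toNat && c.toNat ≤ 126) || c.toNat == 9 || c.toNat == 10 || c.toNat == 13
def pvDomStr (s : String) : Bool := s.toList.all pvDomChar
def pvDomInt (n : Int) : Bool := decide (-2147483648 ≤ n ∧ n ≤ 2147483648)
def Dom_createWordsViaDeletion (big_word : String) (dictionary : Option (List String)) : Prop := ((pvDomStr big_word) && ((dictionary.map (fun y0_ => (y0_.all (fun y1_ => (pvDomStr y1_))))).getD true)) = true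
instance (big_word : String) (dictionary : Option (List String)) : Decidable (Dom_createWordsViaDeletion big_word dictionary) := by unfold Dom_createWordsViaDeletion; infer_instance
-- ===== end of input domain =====

-- B builds a next-occurrence jump table over the cleaned big_word once and tests each word
-- as a true subsequence in one pass of table hops; it intentionally drops A's accidental
-- acceptance of words whose doubled letters reuse a single position (see D_ below).

-- ===== PORT A =====
-- 'dictionary = sorted(map(str.lower, masterDictionary), reverse=True, key=len)' with masterDictionary = set()
def pvDefaultDict : List String :=
  PySem.List.sorted ((PySem.Set.ofList ([] : List String)).map PySem.Str.lower) PySem.Str.len true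

-- 'big_word = "".join(i for i in big_word.lower() if i.isalpha())'
def pvClean (big_word : String) : List Char :=
  (PySem.Chars.lower big_word.toList).filter PySem.Chars.isalpha

-- 'i = 0; for L in word: i = big_word.find(L, i); if i == -1: return False; return True'
def pvFindLoop (bw : List Char) : List Char → Int → Bool
  | [], _ => true
  | L :: rest, i =>
      let j := PySem.Chars.findFrom bw [L] i
      if j = -1 then false else pvFindLoop bw rest j

-- 'def checkword(): ...' (big_word_set / big_word_counter are computed once by the caller)
def pvCheckA (bw : List Char) (bwset : PySem.Set Char) (bwcnt : PySem.Dict Char Int)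
    (word : String) : Bool :=
  let w := word.toList
  if !(w.all fun ch => bwset.contains ch) then false
  else
    let c := PySem.Dict.counter w
    if bwcnt.items.any fun ki => c.getD ki.1 0 > ki.2 then false
    else pvFindLoop bw w 0

def createWordsViaDeletion (big_word : String) (dictionary : Option (List String)) : List String :=
  let dict := dictionary.getD pvDefaultDict
  let bw := pvClean big_word
  let bwset := PySem.Set.ofList bw
  let bwcnt := PySem.Dict.counter bw
  dict.filter (pvCheckA bw bwset bwcnt)

-- ===== PORT B =====
-- 'nxt = [dict() ...]; for i in range(n-1,-1,-1): nxt[i] = dict(nxt[i+1]); nxt[i][big[i]] = i'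
-- built back-to-front by structural recursion; first argument is the absolute index of the head
def pvBuildNxt : Nat → List Char → List (PySem.Dict Char Nat)
  | _, [] => [PySem.Dict.empty]
  | i, c :: rest =>
      match pvBuildNxt (i + 1) rest with
      | [] => []                         -- unreachable: pvBuildNxt never returns []
      | d :: t => d.insert c i :: d :: t

-- 'i = 0; for ch in word: j = nxt[i].get(ch); if j is None: break; i = j + 1; else: yield word'
def pvWalkB (nxt : List (PySem.Dict Char Nat)) : List Char → Nat → Bool
  | [], _ => true
  | ch :: rest, i =>
      match (nxt.getD i PySem.Dict.empty).get? ch with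
      | none => false
      | some j => pvWalkB nxt rest (j + 1)

def createWordsViaDeletion_alt (big_word : String) (dictionary : Option (List String)) : List String :=
  let dict := dictionary.getD pvDefaultDict
  let big := pvClean big_word
  let nxt := pvBuildNxt 0 big
  dict.filter (fun word => pvWalkB nxt word.toList 0)

-- ===== PRECONDITION & SPEC =====

-- On dictionaries containing a word that is a sub-multiset of the cleaned big_word and whose
-- run-collapsed form (List.destutter (· ≠ ·)) is a subsequence of it while the word itself is
-- not (e.g. big_word "aba", word "aab"), A yields the word (its find loop restarts AT the
-- matched index, not after it) while B omits it; only words truly obtainable by deleting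
-- letters of big_word are intended.
def D_createWordsViaDeletion (big_word : String) (dictionary : Option (List String)) : Prop :=
  let b := (PySem.Chars.lower big_word.toList).filter PySem.Chars.isalpha
  ∃ w ∈ dictionary.getD [],
    List.Subperm w.toList b ∧ (w.toList.destutter (· ≠ ·)).Sublist b ∧ ¬ w.toList.Sublist b
instance (big_word : String) (dictionary : Option (List String)) : Decidable (D_createWordsViaDeletion big_word dictionary) := by unfold D_createWordsViaDeletion; infer_instance

def Spec_createWordsViaDeletion (big_word : String) (dictionary : Option (List String)) (out : List String) : Prop := ¬ D_createWordsViaDeletion big_word dictionary → out = createWordsViaDeletion_alt big_word dictionary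
instance (big_word : String) (dictionary : Option (List String)) (out : List String) : Decidable (Spec_createWordsViaDeletion big_word dictionary out) := by unfold Spec_createWordsViaDeletion; infer_instance

def pvDiffWitness_createWordsViaDeletion : String × Option (List String) := ("aba", some ["aab"])
def pvDiffWitnessOut_createWordsViaDeletion : (List String) × (List String) := (["aab"], [])

-- ===== CLAIM (what is proved, stated in full; the proofs are below) =====
def Claim_unchanged_createWordsViaDeletion : Prop := ∀ (big_word : String) (dictionary : Option (List String)), Dom_createWordsViaDeletion big_word dictionary → Spec_createWordsViaDeletion big_word dictionary (createWordsViaDeletion big_word dictionary)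
def Claim_changed_createWordsViaDeletion : Prop := Dom_createWordsViaDeletion (pvDiffWitness_createWordsViaDeletion.1) (pvDiffWitness_createWordsViaDeletion.2) ∧ D_createWordsViaDeletion (pvDiffWitness_createWordsViaDeletion.1) (pvDiffWitness_createWordsViaDeletion.2) ∧ createWordsViaDeletion (pvDiffWitness_createWordsViaDeletion.1) (pvDiffWitness_createWordsViaDeletion.2) = pvDiffWitnessOut_createWordsViaDeletion.1 ∧ createWordsViaDeletion_alt (pvDiffWitness_createWordsViaDeletion.1) (pvDiffWitness_createWordsViaDeletion.2) = pvDiffWitnessOut_createWordsViaDeletion.2 ∧ pvDiffWitnessOut_createWordsViaDeletion.1 ≠ pvDiffWitnessOut_createWordsViaDeletion.2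
def Claim_exact_createWordsViaDeletion : Prop := ∀ (big_word : String) (dictionary : Option (List String)), Dom_createWordsViaDeletion big_word dictionary → D_createWordsViaDeletion big_word dictionary → createWordsViaDeletion big_word dictionary ≠ createWordsViaDeletion_alt big_word dictionary

-- ===== LEMMAS AND PROOFS =====

-- run-collapse of a word ("aab" ↦ "ab"): spec-side model of what A's non-advancing find accepts
def pvCollapseAux : Char → List Char → List Char
  | _, [] => []
  | p, c :: w => if c = p then pvCollapseAux p w else c :: pvCollapseAux c w

def pvCollapse : List Char → List Char
  | [] => []
  | c :: w => c :: pvCollapseAux c w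

-- the acceptance condition A computes, stated mathematically
abbrev pvAccept (w bw : List Char) : Prop :=
  (∀ c ∈ w, w.count c ≤ bw.count c) ∧ (pvCollapse w).Sublist bw

-- greedy nondecreasing matcher (A's find loop never advances past a match): proof-side model
def pvNdm : List Char → List Char → Bool
  | [], _ => true
  | _ :: _, [] => false
  | c :: w, d :: s => if c = d then pvNdm w (d :: s) else pvNdm (c :: w) s
termination_by w s => w.length + s.length
decreasing_by all_goals (simp only [List.length_cons]; omega)

theorem pv_sublist_cons_ne {a d : Char} {l1 l2 : List Char} (h : a ≠ d) :
    (a :: l1).Sublist (d :: l2) ↔ (a :: l1).Sublist l2 := by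
  constructor
  · intro h2
    rcases List.sublist_cons_iff.mp h2 with h3 | ⟨r, hr, h4⟩
    · exact h3
    · cases hr; exact absurd rfl h
  · intro h2; exact h2.trans (List.sublist_cons_self _ _)

theorem pvNdm_pair : ∀ (n : Nat) (w s : List Char),
    (w.length + s.length ≤ n → (pvNdm w s = true ↔ (pvCollapse w).Sublist s)) ∧
    (w.length + s.length + 1 ≤ n → ∀ p, (pvNdm w (p :: s) = true ↔ (pvCollapseAux p w).Sublist s)) := by
  intro n
  induction n with
  | zero =>
    intro w s
    constructor
    · intro h
      have hw : w = [] := by cases w <;> simp_all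
      have hs : s = [] := by cases s <;> simp_all
      subst hw; subst hs; simp [pvNdm, pvCollapse]
    · intro h; omega
  | succ n ih =>
    intro w s
    constructor
    · intro h
      match w, s with
      | [], s => simp [pvNdm, pvCollapse]
      | c :: w', [] => simp [pvNdm, pvCollapse]
      | c :: w', d :: s' =>
        by_cases hcd : c = d
        · subst hcd
          simp only [pvNdm, pvCollapse, List.cons_sublist_cons]
          exact (ih w' s').2 (by simp at h ⊢; omega) c
        · simp only [pvNdm, if_neg hcd, pvCollapse]
          rw [show (c :: pvCollapseAux c w').Sublist (d :: s') ↔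
                (c :: pvCollapseAux c w').Sublist s' from pv_sublist_cons_ne hcd]
          have := ((ih (c :: w') s').1 (by simp at h ⊢; omega))
          simpa [pvCollapse] using this
    · intro h p
      match w with
      | [] => simp [pvNdm, pvCollapseAux]
      | c :: w' =>
        by_cases hcp : c = p
        · subst hcp
          simp only [pvNdm, pvCollapseAux]
          exact (ih w' s).2 (by simp at h ⊢; omega) c
        · simp only [pvNdm, pvCollapseAux, if_neg hcp]
          have := ((ih (c :: w') s).1 (by simp at h ⊢; omega))
          simpa [pvCollapse] using this

theorem pvNdm_iff (w s : List Char) : pvNdm w s = true ↔ (pvCollapse w).Sublist s :=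
  (pvNdm_pair (w.length + s.length) w s).1 le_rfl

theorem pvNdm_head_not_mem {L : Char} {s : List Char} (w : List Char) (h : L ∉ s) :
    pvNdm (L :: w) s = false := by
  induction s with
  | nil => simp [pvNdm]
  | cons d t ih =>
    have hLd : L ≠ d := by intro he; exact h (he ▸ List.mem_cons_self ..)
    simp only [pvNdm, if_neg hLd]
    exact ih (fun hm => h (List.mem_cons_of_mem _ hm))

-- str.find(L, ...) facts for a single-character needle
theorem pv_find_singleton_eq {s : List Char} {L : Char} {j : Nat}
    (h1 : [L] <+: s.drop j) (h2 : ∀ i < j, ¬ [L] <+: s.drop i) :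
    PySem.Chars.find s [L] = (j : Int) := by
  have hin : [L] <:+: s := h1.isInfix.trans (s.drop_suffix j).isInfix
  have hne := (PySem.Chars.find_ne_neg_one_iff s [L]).mpr hin
  have hlb := PySem.Chars.neg_one_le_find s [L]
  have hge : 0 ≤ PySem.Chars.find s [L] := by omega
  obtain ⟨hpre, hmin⟩ := PySem.Chars.find_spec hge
  rcases lt_trichotomy (PySem.Chars.find s [L]).toNat j with hlt | heq | hgt
  · exact absurd hpre (h2 _ hlt)
  · omega
  · exact absurd h1 (hmin j hgt)

theorem pv_find_singleton_nil (L : Char) : PySem.Chars.find [] [L] = -1 := by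
  rw [PySem.Chars.find_eq_neg_one_iff]
  simp

theorem pv_find_singleton_cons_self (L : Char) (t : List Char) :
    PySem.Chars.find (L :: t) [L] = 0 := by
  have := pv_find_singleton_eq (s := L :: t) (L := L) (j := 0) (by simp) (by omega)
  simpa using this

theorem pv_find_singleton_cons_ne {L d : Char} (t : List Char) (h : L ≠ d) :
    PySem.Chars.find (d :: t) [L] =
      if PySem.Chars.find t [L] = -1 then -1 else PySem.Chars.find t [L] + 1 := by
  by_cases hft : PySem.Chars.find t [L] = -1
  · rw [if_pos hft, PySem.Chars.find_eq_neg_one_iff]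
    rw [PySem.Chars.find_eq_neg_one_iff] at hft
    simp [List.singleton_infix_iff] at hft ⊢
    exact ⟨h, hft⟩
  · rw [if_neg hft]
    have hlb := PySem.Chars.neg_one_le_find t [L]
    have hge : 0 ≤ PySem.Chars.find t [L] := by omega
    obtain ⟨hpre, hmin⟩ := PySem.Chars.find_spec hge
    have := pv_find_singleton_eq (s := d :: t) (L := L)
      (j := (PySem.Chars.find t [L]).toNat + 1)
      (by simpa using hpre)
      (by
        intro i hi
        cases i with
        | zero =>
          simp only [List.drop_zero]
          intro hp
          rcases hp with ⟨t', ht'⟩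
          have hdL : L = d := by simpa using congrArg List.head? ht'
          exact h hdL
        | succ i' =>
          have hi' : i' < (PySem.Chars.find t [L]).toNat := by omega
          simpa using hmin i' hi')
    rw [this]
    omega

-- A's find loop computes the greedy nondecreasing matcher on the remaining suffix
theorem pvFindLoop_eq_ndm (bw : List Char) : ∀ (n : Nat) (w : List Char) (k : Nat),
    w.length + (bw.length - k) ≤ n → k ≤ bw.length →
    pvFindLoop bw w (k : Int) = pvNdm w (bw.drop k) := by
  intro n
  induction n with
  | zero =>
    intro w k h hk
    have hw : w = [] := by cases w <;> simp_all
    subst hw; simp [pvFindLoop, pvNdm]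
  | succ n ih =>
    intro w k h hk
    cases w with
    | nil => simp [pvFindLoop, pvNdm]
    | cons L rest =>
      simp only [pvFindLoop]
      rw [PySem.Chars.findFrom_natCast bw [L] k hk]
      cases hdrop : bw.drop k with
      | nil =>
        rw [pv_find_singleton_nil]
        simp [pvNdm]
      | cons d t =>
        have hklt : k < bw.length := by
          by_contra hge
          have : bw.drop k = [] := List.drop_eq_nil_of_le (by omega)
          rw [this] at hdrop; cases hdrop
        have ht : bw.drop (k + 1) = t := by
          rw [← List.tail_drop, hdrop]; rfl
        by_cases hLd : L = d
        · subst hLd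
          rw [pv_find_singleton_cons_self]
          rw [if_neg (by norm_num : ¬ ((0:Int) = -1))]
          rw [if_neg (by omega : ¬ ((k : Int) + 0 = -1))]
          rw [(by omega : (k : Int) + 0 = (k : Int))]
          rw [ih rest k (by simp at h ⊢; omega) hk]
          rw [hdrop]
          simp [pvNdm]
        · rw [pv_find_singleton_cons_ne t hLd]
          by_cases hft : PySem.Chars.find t [L] = -1
          · rw [if_pos hft]
            rw [if_pos (by norm_num)]
            have hmem : L ∉ t := by
              rw [PySem.Chars.find_eq_neg_one_iff] at hft
              simpa [List.singleton_infix_iff] using hft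
            simp only [pvNdm, if_neg hLd]
            exact (pvNdm_head_not_mem rest hmem).symm
          · rw [if_neg hft]
            have hlb := PySem.Chars.neg_one_le_find t [L]
            have hge : 0 ≤ PySem.Chars.find t [L] := by omega
            rw [if_neg (by omega : ¬ (PySem.Chars.find t [L] + 1 = -1))]
            have e1 : pvFindLoop bw (L :: rest) ((k + 1 : Nat) : Int) =
                pvFindLoop bw rest ((k : Int) + (PySem.Chars.find t [L] + 1)) := by
              simp only [pvFindLoop]
              rw [PySem.Chars.findFrom_natCast bw [L] (k + 1) (by omega), ht]
              rw [if_neg hft]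
              rw [if_neg (by push_cast; omega)]
              congr 1
              push_cast
              ring
            rw [← e1]
            rw [ih (L :: rest) (k + 1) (by simp at h ⊢; omega) (by omega), ht]
            have e2 : pvNdm (L :: rest) (d :: t) = pvNdm (L :: rest) t := by
              simp only [pvNdm, if_neg hLd]
            rw [e2, if_neg (by omega : ¬ ((k : Int) + (PySem.Chars.find t [L] + 1) = -1))]

-- the three tests of checkword, mathematically
theorem pv_all_contains_iff (w bw : List Char) :
    (w.all fun ch => (PySem.Set.ofList bw).contains ch) = true ↔ ∀ c ∈ w, c ∈ bw := by
  simp [pysem]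

theorem pv_counter_any_iff (w bw : List Char) :
    ((PySem.Dict.counter bw).items.any fun ki => (PySem.Dict.counter w).getD ki.1 0 > ki.2) = false ↔
      ∀ c ∈ bw, w.count c ≤ bw.count c := by
  rw [PySem.Dict.items_counter]
  simp only [List.any_map, List.any_eq_false, Function.comp]
  constructor
  · intro hall c hc
    have := hall c ((PySem.Set.mem_ofList bw c).mpr hc)
    simp [PySem.Dict.getD_counter] at this
    exact_mod_cast this
  · intro hall k hk
    have := hall k ((PySem.Set.mem_ofList bw k).mp hk)
    simp [PySem.Dict.getD_counter]
    exact_mod_cast this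

theorem pvCheckA_iff (bw : List Char) (word : String) :
    pvCheckA bw (PySem.Set.ofList bw) (PySem.Dict.counter bw) word = true ↔
      pvAccept word.toList bw := by
  unfold pvCheckA
  dsimp only
  split
  · next h1 =>
    constructor
    · intro hfalse; cases hfalse
    · rintro ⟨hcnt, _⟩
      exfalso
      have hmem : ∀ c ∈ word.toList, c ∈ bw := by
        intro c hc
        have h1' := hcnt c hc
        have h2' : 0 < word.toList.count c := List.count_pos_iff.mpr hc
        exact List.count_pos_iff.mp (by omega)
      rw [(pv_all_contains_iff word.toList bw).mpr hmem] at h1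
      simp at h1
  · next h1 =>
    have h1' : (word.toList.all fun ch => (PySem.Set.ofList bw).contains ch) = true := by
      cases hv : (word.toList.all fun ch => (PySem.Set.ofList bw).contains ch)
      · rw [hv] at h1; simp at h1
      · rfl
    split
    · next h2 =>
      constructor
      · intro hfalse; cases hfalse
      · rintro ⟨hcnt, _⟩
        exfalso
        have hall : ∀ c ∈ bw, word.toList.count c ≤ bw.count c := by
          intro c _
          by_cases hcw : c ∈ word.toList
          · exact hcnt c hcw
          · have : word.toList.count c = 0 := List.count_eq_zero.mpr hcw
            omega
        rw [(pv_counter_any_iff word.toList bw).mpr hall] at h2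
        cases h2
    · next h2 =>
      have h0 := pvFindLoop_eq_ndm bw (word.toList.length + bw.length) word.toList 0
        (by omega) (by omega)
      simp only [Nat.cast_zero, List.drop_zero] at h0
      rw [h0, pvNdm_iff]
      constructor
      · intro hcol
        refine ⟨?_, hcol⟩
        intro c hcw
        have h2' : ((PySem.Dict.counter bw).items.any fun ki => (PySem.Dict.counter word.toList).getD ki.1 0 > ki.2) = false := by
          cases hv : ((PySem.Dict.counter bw).items.any fun ki => (PySem.Dict.counter word.toList).getD ki.1 0 > ki.2)
          · rfl
          · exact absurd hv h2
        exact (pv_counter_any_iff word.toList bw).mp h2' c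
          ((pv_all_contains_iff word.toList bw).mp h1' c hcw)
      · rintro ⟨_, hcol⟩; exact hcol

theorem pvDefaultDict_eq : pvDefaultDict = [] := by decide

-- ===== B-side lemmas: the jump table and the one-pass walk test plain subsequence =====

theorem pvBuildNxt_ne_nil (i : Nat) (big : List Char) : pvBuildNxt i big ≠ [] := by
  induction big generalizing i with
  | nil => simp [pvBuildNxt]
  | cons c rest ih =>
    simp only [pvBuildNxt]
    cases h : pvBuildNxt (i + 1) rest with
    | nil => exact absurd h (ih (i + 1))
    | cons d t => simp

-- entry k of the table built with base index i: least occurrence of c in big.drop k, offset by i + k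
theorem pvBuildNxt_get (big : List Char) : ∀ (i k : Nat) (c : Char), k ≤ big.length →
    ((pvBuildNxt i big).getD k PySem.Dict.empty).get? c =
      ((big.drop k).findIdx? (fun x => x == c)).map (fun m => i + k + m) := by
  induction big with
  | nil =>
    intro i k c hk
    have hk0 : k = 0 := by simpa using hk
    subst hk0
    simp [pvBuildNxt, PySem.Dict.get?_empty]
  | cons d rest ih =>
    intro i k c hk
    simp only [pvBuildNxt]
    cases h : pvBuildNxt (i + 1) rest with
    | nil => exact absurd h (pvBuildNxt_ne_nil (i + 1) rest)
    | cons d0 t =>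
      cases k with
      | zero =>
        have hd0 : d0 = (pvBuildNxt (i + 1) rest).getD 0 PySem.Dict.empty := by rw [h]; rfl
        simp only [List.getD_cons_zero, List.drop_zero, List.findIdx?_cons]
        rw [PySem.Dict.get?_insert]
        by_cases hcd : c = d
        · subst hcd; simp
        · rw [if_neg hcd]
          rw [hd0, ih (i + 1) 0 c (by omega)]
          simp only [List.drop_zero]
          have hbeq : (d == c) = false := by simp [Ne.symm hcd]
          rw [hbeq]
          simp only [Bool.false_eq_true, if_false, Option.map_map]
          cases rest.findIdx? (fun x => x == c) with
          | none => simp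
          | some m => simp [Function.comp]; omega
      | succ k' =>
        have hk' : k' ≤ rest.length := by simp at hk; omega
        have hgd : (d0 :: t).getD k' PySem.Dict.empty =
            (pvBuildNxt (i + 1) rest).getD k' PySem.Dict.empty := by rw [h]
        simp only [List.getD_cons_succ, List.drop_succ_cons]
        rw [hgd, ih (i + 1) k' c hk']
        cases (rest.drop k').findIdx? (fun x => x == c) with
        | none => simp
        | some m => simp; omega

-- greedy matcher by first occurrence: what B's walk computes on the remaining suffix
def pvG2 : List Char → List Char → Bool
  | [], _ => true
  | c :: w, s =>
      match s.findIdx? (fun x => x == c) with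
      | none => false
      | some m => pvG2 w (s.drop (m + 1))

theorem pvWalkB_eq (big : List Char) : ∀ (w : List Char) (k : Nat), k ≤ big.length →
    pvWalkB (pvBuildNxt 0 big) w k = pvG2 w (big.drop k) := by
  intro w
  induction w with
  | nil => intro k hk; simp [pvWalkB, pvG2]
  | cons ch rest ihw =>
    intro k hk
    simp only [pvWalkB, pvG2]
    rw [pvBuildNxt_get big 0 k ch hk]
    cases hf : (big.drop k).findIdx? (fun x => x == ch) with
    | none => simp
    | some m =>
      have hm : m < (big.drop k).length := by
        have := List.findIdx?_eq_some_iff_findIdx_eq.mp hf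
        omega
      have hmlt : k + m + 1 ≤ big.length := by
        rw [List.length_drop] at hm
        omega
      simp only [Option.map_some]
      rw [ihw (0 + k + m + 1) (by omega)]
      congr 1
      rw [List.drop_drop]
      congr 1
      omega

theorem pvG2_eq_isSublist : ∀ (w s : List Char), pvG2 w s = w.isSublist s := by
  intro w
  induction w with
  | nil => intro s; cases s <;> simp [pvG2, List.isSublist]
  | cons c w ihw =>
    intro s
    induction s with
    | nil => simp [pvG2, List.isSublist]
    | cons d s ihs =>
      by_cases hcd : c = d
      · subst hcd
        simp only [pvG2, List.findIdx?_cons, beq_self_eq_true, if_true, List.isSublist,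
          beq_self_eq_true, List.drop_succ_cons, List.drop_zero]
        exact ihw s
      · have hbeq : (d == c) = false := by simp [Ne.symm hcd]
        have hbeq' : (c == d) = false := by simp [hcd]
        have hstep : pvG2 (c :: w) (d :: s) = pvG2 (c :: w) s := by
          simp only [pvG2, List.findIdx?_cons, hbeq, Bool.false_eq_true, if_false]
          cases hf : s.findIdx? (fun x => x == c) with
          | none => simp
          | some m => simp
        rw [hstep, ihs]
        simp [List.isSublist, hbeq']

theorem pvCheckB_iff (big : List Char) (word : String) :
    pvWalkB (pvBuildNxt 0 big) word.toList 0 = true ↔ word.toList.Sublist big := by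
  rw [pvWalkB_eq big word.toList 0 (by omega), List.drop_zero, pvG2_eq_isSublist,
    List.isSublist_iff_sublist]

theorem pvCollapseAux_sublist : ∀ (p : Char) (w : List Char), (pvCollapseAux p w).Sublist w := by
  intro p w
  induction w generalizing p with
  | nil => simp [pvCollapseAux]
  | cons c w ih =>
    simp only [pvCollapseAux]
    by_cases hcp : c = p
    · rw [if_pos hcp]
      exact (ih p).trans (List.sublist_cons_self c w)
    · rw [if_neg hcp]
      exact List.cons_sublist_cons.mpr (ih c)

theorem pvCollapse_sublist (w : List Char) : (pvCollapse w).Sublist w := by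
  cases w with
  | nil => simp [pvCollapse]
  | cons c w => exact List.cons_sublist_cons.mpr (pvCollapseAux_sublist c w)

theorem pvDestutter'_eq (p : Char) (w : List Char) :
    List.destutter' (· ≠ ·) p w = p :: pvCollapseAux p w := by
  induction w generalizing p with
  | nil => simp [List.destutter', pvCollapseAux]
  | cons c w ih =>
    simp only [List.destutter', pvCollapseAux]
    by_cases h : c = p
    · subst h; simp [ih]
    · rw [if_pos (Ne.symm h), if_neg h, ih]

theorem pvDestutter_eq (w : List Char) : w.destutter (· ≠ ·) = pvCollapse w := by
  cases w with
  | nil => simp [List.destutter, pvCollapse]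
  | cons c w => simp [List.destutter, pvCollapse, pvDestutter'_eq]

-- ===== VERDICT (by name: the statements are the Claim_ definitions above) =====
theorem createWordsViaDeletion_spec : Claim_unchanged_createWordsViaDeletion := by
  intro big_word dictionary _ hD
  show createWordsViaDeletion big_word dictionary = createWordsViaDeletion_alt big_word dictionary
  unfold createWordsViaDeletion createWordsViaDeletion_alt
  cases dictionary with
  | none => simp [pvDefaultDict_eq]
  | some d =>
    simp only [Option.getD_some]
    apply List.filter_congr
    intro word hw
    rw [Bool.eq_iff_iff, pvCheckA_iff, pvCheckB_iff]
    constructor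
    · rintro ⟨hcnt, hcol⟩
      by_contra hnsub
      exact hD ⟨word, hw, List.subperm_ext_iff.mpr hcnt,
        (pvDestutter_eq word.toList).symm ▸ hcol, hnsub⟩
    · intro hsub
      exact ⟨fun c _ => hsub.count_le c, (pvCollapse_sublist word.toList).trans hsub⟩

set_option maxRecDepth 10000 in
theorem createWordsViaDeletion_changed : Claim_changed_createWordsViaDeletion := by
  unfold Claim_changed_createWordsViaDeletion
  refine ⟨by decide, by decide, by decide, by decide, by decide⟩

theorem createWordsViaDeletion_tight : Claim_exact_createWordsViaDeletion := by
  intro big_word dictionary _ hD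
  obtain ⟨w, hw, hsp, hcolD, hnsub⟩ := hD
  have hcnt : ∀ c ∈ w.toList, w.toList.count c ≤
      ((PySem.Chars.lower big_word.toList).filter PySem.Chars.isalpha).count c :=
    fun c hc => List.subperm_ext_iff.mp hsp c hc
  have hcol : (pvCollapse w.toList).Sublist
      ((PySem.Chars.lower big_word.toList).filter PySem.Chars.isalpha) :=
    pvDestutter_eq w.toList ▸ hcolD
  cases dictionary with
  | none => simp at hw
  | some d =>
    simp only [Option.getD_some] at hw
    intro heq
    have hA : w ∈ createWordsViaDeletion big_word (some d) := by
      unfold createWordsViaDeletion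
      simp only [Option.getD_some]
      exact List.mem_filter.mpr ⟨hw, (pvCheckA_iff (pvClean big_word) w).mpr ⟨hcnt, hcol⟩⟩
    rw [heq] at hA
    unfold createWordsViaDeletion_alt at hA
    simp only [Option.getD_some] at hA
    have hB := (List.mem_filter.mp hA).2
    exact hnsub ((pvCheckB_iff (pvClean big_word) w).mp hB)
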